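-- pv_equiv track=rewrite | github.com/cjipro/mil_streamlit | mil/publish/publish.py | detect_source_coverage
-- ===== SOURCE A (Python) =====
-- def detect_source_coverage(signals: list) -> dict:
--     """Return dict of source → status (active/amber/inactive)."""
--     sources_in_data = set(s.get("source") for s in signals)
--     all_sources = [
--         "downdetector", "app_store", "google_play", "financial_times",
--         "city_am", "reddit", "trustpilot", "facebook", "youtube", "twitter_x",
--     ]
--     # Map ft_cityam → financial_times + city_am
--     if "ft_cityam" in sources_in_data:
--         sources_in_data.add("financial_times")
--         sources_in_data.add("city_am")
--
--     result = {}
--     for src in all_sources: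
--         if src in sources_in_data:
--             result[src] = "active"
--         elif src == "facebook":
--             result[src] = "stub"  # known stub
--         else:
--             result[src] = "inactive"
--     return result
-- ===== SOURCE B (Python) =====
-- def detect_source_coverage(signals: list) -> dict:
--     """Return dict of source → status (active/amber/inactive)."""
--     result = {
--         "downdetector": "inactive", "app_store": "inactive", "google_play": "inactive",
--         "financial_times": "inactive", "city_am": "inactive", "reddit": "inactive",
--         "trustpilot": "inactive", "facebook": "stub", "youtube": "inactive",
--         "twitter_x": "inactive",
--     }
--     for s in signals:
--         src = s.get("source")
--         if src == "ft_cityam":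
--             result["financial_times"] = "active"
--             result["city_am"] = "active"
--         elif src in result:
--             result[src] = "active"
--     return result
-- ===== Notes on version B (the rewrite author's own statement) =====
-- stated objective: alternative
-- what changed: A builds a membership set of all signal sources (plus an ft_cityam expansion) and then scans the fixed source list testing each; B starts from a defaults dict (facebook->stub, others->inactive) built once and makes a single pass over the signals flipping the matching entry (or both ft keys) to active, with no membership set at all.
import Mathlib
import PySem

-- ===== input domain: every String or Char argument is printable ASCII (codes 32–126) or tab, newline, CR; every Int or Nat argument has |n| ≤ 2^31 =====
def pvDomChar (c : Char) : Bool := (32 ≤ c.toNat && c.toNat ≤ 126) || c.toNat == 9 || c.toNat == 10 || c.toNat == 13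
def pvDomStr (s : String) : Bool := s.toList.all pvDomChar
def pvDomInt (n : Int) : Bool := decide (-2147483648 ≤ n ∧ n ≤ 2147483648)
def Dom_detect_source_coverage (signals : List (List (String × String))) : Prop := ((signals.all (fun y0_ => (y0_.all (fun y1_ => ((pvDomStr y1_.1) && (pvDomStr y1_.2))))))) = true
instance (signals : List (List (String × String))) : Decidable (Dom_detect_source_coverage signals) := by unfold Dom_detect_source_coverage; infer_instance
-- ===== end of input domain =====

-- B replaces A's membership-set + fixed-list scan by a defaults dict updated in one pass over the signals (alternative decomposition, same cost).


-- ===== PORT A =====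
def detect_source_coverage (signals : List (List (String × String))) : List (String × String) :=
  let sources_in_data : PySem.Set (Option String) :=
    PySem.Set.ofList (signals.map (fun s => (PySem.Dict.mk s).get? "source"))
  let all_sources : List String :=
    ["downdetector", "app_store", "google_play", "financial_times",
     "city_am", "reddit", "trustpilot", "facebook", "youtube", "twitter_x"]
  -- Map ft_cityam → financial_times + city_am
  let sources_in_data :=
    if sources_in_data.contains (some "ft_cityam") then
      (sources_in_data.add (some "financial_times")).add (some "city_am")
    else sources_in_data
  (all_sources.foldl (fun result src =>
      if sources_in_data.contains (some src) then result.insert src "active"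
      else if src == "facebook" then result.insert src "stub"
      else result.insert src "inactive")
    (PySem.Dict.empty : PySem.Dict String String)).items

-- ===== PORT B =====
def bStep (result : PySem.Dict String String) (s : List (String × String)) :
    PySem.Dict String String :=
  let src := (PySem.Dict.mk s).get? "source"
  if src == some "ft_cityam" then
    (result.insert "financial_times" "active").insert "city_am" "active"
  else
    match src with
    | some v => if result.contains v then result.insert v "active" else result
    | none => result

def detect_source_coverage_alt (signals : List (List (String × String))) : List (String × String) :=
  (signals.foldl bStep (PySem.Dict.ofList
    [("downdetector", "inactive"), ("app_store", "inactive"), ("google_play", "inactive"),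
     ("financial_times", "inactive"), ("city_am", "inactive"), ("reddit", "inactive"),
     ("trustpilot", "inactive"), ("facebook", "stub"), ("youtube", "inactive"),
     ("twitter_x", "inactive")])).items

-- ===== PRECONDITION & SPEC =====
def Spec_detect_source_coverage (signals : List (List (String × String))) (out : List (String × String)) : Prop := out = detect_source_coverage_alt signals
instance (signals : List (List (String × String))) (out : List (String × String)) : Decidable (Spec_detect_source_coverage signals out) := by unfold Spec_detect_source_coverage; infer_instance

-- ===== CLAIM (what is proved, stated in full; the proofs are below) =====
def Claim_equal_detect_source_coverage : Prop := ∀ (signals : List (List (String × String))), Dom_detect_source_coverage signals → Spec_detect_source_coverage signals (detect_source_coverage signals)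

-- ===== LEMMAS AND PROOFS =====

-- the source of one signal
def srcOf (s : List (String × String)) : Option String := (PySem.Dict.mk s).get? "source"

-- does one signal activate key k?
def act1 (s : List (String × String)) (k : String) : Bool :=
  (srcOf s == some k) ||
    ((k == "financial_times" || k == "city_am") && (srcOf s == some "ft_cityam"))

-- does any signal activate key k?
def hot (signals : List (List (String × String))) (k : String) : Bool :=
  signals.any (fun s => act1 s k)

-- the shape both results share: the ten keys in order, with arbitrary values
def tmpl (a b c d e f g h i j : String) : PySem.Dict String String :=
  ⟨[("downdetector", a), ("app_store", b), ("google_play", c), ("financial_times", d),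
    ("city_am", e), ("reddit", f), ("trustpilot", g), ("facebook", h),
    ("youtube", i), ("twitter_x", j)]⟩

lemma bStep_tmpl (s : List (String × String)) (a b c d e f g h i j : String) :
    bStep (tmpl a b c d e f g h i j) s =
      tmpl (if act1 s "downdetector" then "active" else a)
           (if act1 s "app_store" then "active" else b)
           (if act1 s "google_play" then "active" else c)
           (if act1 s "financial_times" then "active" else d)
           (if act1 s "city_am" then "active" else e)
           (if act1 s "reddit" then "active" else f)
           (if act1 s "trustpilot" then "active" else g)
           (if act1 s "facebook" then "active" else h)
           (if act1 s "youtube" then "active" else i)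
           (if act1 s "twitter_x" then "active" else j) := by
  cases hsrc : srcOf s with
  | none =>
      simp [bStep, act1, srcOf] at hsrc ⊢
      simp [hsrc]
  | some v =>
      by_cases hft : v = "ft_cityam"
      · subst hft
        simp [bStep, act1, srcOf] at hsrc ⊢
        simp [hsrc, tmpl, PySem.Dict.insert, PySem.Dict.contains]
      · by_cases h1 : v = "downdetector"
        · subst h1; simp [bStep, act1, srcOf] at hsrc ⊢
          simp [hsrc, tmpl, PySem.Dict.insert, PySem.Dict.contains]
        by_cases h2 : v = "app_store"
        · subst h2; simp [bStep, act1, srcOf] at hsrc ⊢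
          simp [hsrc, tmpl, PySem.Dict.insert, PySem.Dict.contains]
        by_cases h3 : v = "google_play"
        · subst h3; simp [bStep, act1, srcOf] at hsrc ⊢
          simp [hsrc, tmpl, PySem.Dict.insert, PySem.Dict.contains]
        by_cases h4 : v = "financial_times"
        · subst h4; simp [bStep, act1, srcOf] at hsrc ⊢
          simp [hsrc, tmpl, PySem.Dict.insert, PySem.Dict.contains]
        by_cases h5 : v = "city_am"
        · subst h5; simp [bStep, act1, srcOf] at hsrc ⊢
          simp [hsrc, tmpl, PySem.Dict.insert, PySem.Dict.contains]
        by_cases h6 : v = "reddit"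
        · subst h6; simp [bStep, act1, srcOf] at hsrc ⊢
          simp [hsrc, tmpl, PySem.Dict.insert, PySem.Dict.contains]
        by_cases h7 : v = "trustpilot"
        · subst h7; simp [bStep, act1, srcOf] at hsrc ⊢
          simp [hsrc, tmpl, PySem.Dict.insert, PySem.Dict.contains]
        by_cases h8 : v = "facebook"
        · subst h8; simp [bStep, act1, srcOf] at hsrc ⊢
          simp [hsrc, tmpl, PySem.Dict.insert, PySem.Dict.contains]
        by_cases h9 : v = "youtube"
        · subst h9; simp [bStep, act1, srcOf] at hsrc ⊢
          simp [hsrc, tmpl, PySem.Dict.insert, PySem.Dict.contains]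
        by_cases h10 : v = "twitter_x"
        · subst h10; simp [bStep, act1, srcOf] at hsrc ⊢
          simp [hsrc, tmpl, PySem.Dict.insert, PySem.Dict.contains]
        · simp [bStep, act1, srcOf] at hsrc ⊢
          simp [hsrc, tmpl, PySem.Dict.insert, PySem.Dict.contains,
                hft, h1, h2, h3, h4, h5, h6, h7, h8, h9, h10]
          intro hd
          rcases hd with rfl | rfl | rfl | rfl | rfl | rfl | rfl | rfl | rfl | rfl <;> simp_all

lemma foldB (signals : List (List (String × String))) (a b c d e f g h i j : String) :
    signals.foldl bStep (tmpl a b c d e f g h i j) =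
      tmpl (if hot signals "downdetector" then "active" else a)
           (if hot signals "app_store" then "active" else b)
           (if hot signals "google_play" then "active" else c)
           (if hot signals "financial_times" then "active" else d)
           (if hot signals "city_am" then "active" else e)
           (if hot signals "reddit" then "active" else f)
           (if hot signals "trustpilot" then "active" else g)
           (if hot signals "facebook" then "active" else h)
           (if hot signals "youtube" then "active" else i)
           (if hot signals "twitter_x" then "active" else j) := by
  induction signals generalizing a b c d e f g h i j with
  | nil => simp [hot]
  | cons s rest ih =>
      have key : ∀ (k x : String),
          (if hot rest k then "active" else if act1 s k then "active" else x)
            = (if hot (s :: rest) k then "active" else x) := by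
        intro k x
        cases hc : act1 s k <;> simp [hot, List.any_cons, hc]
      simp only [List.foldl_cons, bStep_tmpl, ih, key]

lemma stepA (E : PySem.Set (Option String)) :
    (fun (result : PySem.Dict String String) (src : String) =>
      if E.contains (some src) then result.insert src "active"
      else if src == "facebook" then result.insert src "stub"
      else result.insert src "inactive")
    = fun (result : PySem.Dict String String) (src : String) =>
        result.insert src
          (if E.contains (some src) then "active"
           else if src == "facebook" then "stub" else "inactive") := by
  funext result src
  split_ifs <;> rfl

-- membership in A's (expanded) source set agrees with `hot`
lemma contains_hot (signals : List (List (String × String))) (k : String)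
    (hk : k ≠ "ft_cityam") :
    (if (PySem.Set.ofList (signals.map (fun s => (PySem.Dict.mk s).get? "source"))).contains
          (some "ft_cityam") = true then
        ((PySem.Set.ofList (signals.map (fun s => (PySem.Dict.mk s).get? "source"))).add
            (some "financial_times")).add (some "city_am")
      else
        PySem.Set.ofList (signals.map (fun s => (PySem.Dict.mk s).get? "source"))).contains
        (some k)
      = hot signals k := by
  rw [Bool.eq_iff_iff]
  split_ifs with hft
  · simp only [PySem.Set.contains, List.contains_iff_mem, PySem.Set.mem_add, PySem.Set.mem_ofList,
      List.mem_map, hot, act1, List.any_eq_true, srcOf, Bool.or_eq_true, Bool.and_eq_true,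
      beq_iff_eq, Option.some.injEq] at hft ⊢
    obtain ⟨s0, hs0, hv0⟩ := hft
    constructor
    · rintro ((⟨s, hs, hv⟩ | rfl) | rfl)
      · exact ⟨s, hs, Or.inl hv⟩
      · exact ⟨s0, hs0, Or.inr ⟨Or.inl rfl, hv0⟩⟩
      · exact ⟨s0, hs0, Or.inr ⟨Or.inr rfl, hv0⟩⟩
    · rintro ⟨s, hs, hv | ⟨hk', hv⟩⟩
      · exact Or.inl (Or.inl ⟨s, hs, hv⟩)
      · rcases hk' with rfl | rfl
        · exact Or.inl (Or.inr rfl)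
        · exact Or.inr rfl
  · simp only [PySem.Set.contains, List.contains_iff_mem, PySem.Set.mem_ofList, List.mem_map, hot, act1,
      List.any_eq_true, srcOf, Bool.or_eq_true, Bool.and_eq_true, beq_iff_eq] at hft ⊢
    constructor
    · rintro ⟨s, hs, hv⟩; exact ⟨s, hs, Or.inl hv⟩
    · rintro ⟨s, hs, hv | ⟨_, hv⟩⟩
      · exact ⟨s, hs, hv⟩
      · exact absurd ⟨s, hs, hv⟩ hft

-- ===== VERDICT (by name: the statement is the Claim_ definition above) =====
set_option maxHeartbeats 1000000 in
theorem detect_source_coverage_spec : Claim_equal_detect_source_coverage := by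
  intro signals _
  show detect_source_coverage signals = detect_source_coverage_alt signals
  have hB : detect_source_coverage_alt signals =
      (tmpl (if hot signals "downdetector" then "active" else "inactive")
            (if hot signals "app_store" then "active" else "inactive")
            (if hot signals "google_play" then "active" else "inactive")
            (if hot signals "financial_times" then "active" else "inactive")
            (if hot signals "city_am" then "active" else "inactive")
            (if hot signals "reddit" then "active" else "inactive")
            (if hot signals "trustpilot" then "active" else "inactive")
            (if hot signals "facebook" then "active" else "stub")
            (if hot signals "youtube" then "active" else "inactive")
            (if hot signals "twitter_x" then "active" else "inactive")).items := by
    have h0 : PySem.Dict.ofList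
        [("downdetector", "inactive"), ("app_store", "inactive"), ("google_play", "inactive"),
         ("financial_times", "inactive"), ("city_am", "inactive"), ("reddit", "inactive"),
         ("trustpilot", "inactive"), ("facebook", "stub"), ("youtube", "inactive"),
         ("twitter_x", "inactive")] =
        tmpl "inactive" "inactive" "inactive" "inactive" "inactive" "inactive" "inactive"
          "stub" "inactive" "inactive" := by decide
    rw [detect_source_coverage_alt, h0, foldB]
  rw [hB]
  simp only [detect_source_coverage]
  rw [← contains_hot signals "downdetector" (by decide),
      ← contains_hot signals "app_store" (by decide),
      ← contains_hot signals "google_play" (by decide),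
      ← contains_hot signals "financial_times" (by decide),
      ← contains_hot signals "city_am" (by decide),
      ← contains_hot signals "reddit" (by decide),
      ← contains_hot signals "trustpilot" (by decide),
      ← contains_hot signals "facebook" (by decide),
      ← contains_hot signals "youtube" (by decide),
      ← contains_hot signals "twitter_x" (by decide)]
  generalize (if (PySem.Set.ofList (signals.map (fun s => (PySem.Dict.mk s).get? "source"))).contains
        (some "ft_cityam") = true then
      ((PySem.Set.ofList (signals.map (fun s => (PySem.Dict.mk s).get? "source"))).add
          (some "financial_times")).add (some "city_am")
    else
      PySem.Set.ofList (signals.map (fun s => (PySem.Dict.mk s).get? "source"))) = E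
  rw [stepA]
  simp only [List.foldl_cons, List.foldl_nil]
  generalize PySem.Set.contains E (some "downdetector") = b1
  generalize PySem.Set.contains E (some "app_store") = b2
  generalize PySem.Set.contains E (some "google_play") = b3
  generalize PySem.Set.contains E (some "financial_times") = b4
  generalize PySem.Set.contains E (some "city_am") = b5
  generalize PySem.Set.contains E (some "reddit") = b6
  generalize PySem.Set.contains E (some "trustpilot") = b7
  generalize PySem.Set.contains E (some "facebook") = b8
  generalize PySem.Set.contains E (some "youtube") = b9
  generalize PySem.Set.contains E (some "twitter_x") = b10
  simp [tmpl, PySem.Dict.insert, PySem.Dict.contains, PySem.Dict.empty]
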